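-- pv_equiv track=rewrite | github.com/d4glushko/task_puzzle_15 | tests/test_environment.py | generate_completed_env
-- ===== SOURCE A (Python) =====
-- def generate_completed_env(rows, cols):
--     result = []
--     for i in range(rows):
--         row = []
--         for j in range(cols):
--             if i == rows - 1 and j == cols - 1:
--                 value = None
--             else:
--                 value = i * cols + j + 1
--             row.append(value)
--         result.append(row)
--     return result
-- ===== SOURCE B (Python) =====
-- def generate_completed_env(rows, cols):
--     if rows <= 0:
--         return []
--     flat = list(range(1, rows * cols)) + [None]
--     return [flat[i * cols:(i + 1) * cols] for i in range(rows)]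
-- ===== Notes on version B (the rewrite author's own statement) =====
-- stated objective: simpler
-- what changed: Replaces A's nested row/column loops with the per-cell last-cell conditional by a two-phase flatten-then-chunk build: the flat sequence 1..rows*cols-1 plus None, sliced into rows.
import Mathlib
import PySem

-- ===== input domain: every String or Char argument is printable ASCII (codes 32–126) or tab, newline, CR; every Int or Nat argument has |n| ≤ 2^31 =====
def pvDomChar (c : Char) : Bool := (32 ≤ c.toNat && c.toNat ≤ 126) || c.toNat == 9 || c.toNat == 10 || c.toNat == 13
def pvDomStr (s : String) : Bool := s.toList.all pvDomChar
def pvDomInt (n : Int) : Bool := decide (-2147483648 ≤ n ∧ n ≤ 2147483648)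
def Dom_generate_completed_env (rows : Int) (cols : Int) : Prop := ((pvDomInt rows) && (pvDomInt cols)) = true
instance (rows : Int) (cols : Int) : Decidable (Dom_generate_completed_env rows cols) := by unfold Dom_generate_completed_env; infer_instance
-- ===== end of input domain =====

-- B replaces A's nested loops with a flatten-then-chunk decomposition (build 1..rows*cols-1 plus None, then slice into rows), removing the per-cell last-cell conditional; objective: simpler.

-- ===== PORT A =====
def generate_completed_env (rows : Int) (cols : Int) : List (List (Option Int)) :=
  (PySem.List.pyRange 0 rows).foldl (fun result i =>
    result ++ [ (PySem.List.pyRange 0 cols).foldl (fun row j =>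
        row ++ [ if i = rows - 1 ∧ j = cols - 1 then none else some (i * cols + j + 1) ]) [] ]) []

-- ===== PORT B =====
def generate_completed_env_alt (rows : Int) (cols : Int) : List (List (Option Int)) :=
  if rows ≤ 0 then []
  else
  let flat : List (Option Int) := (PySem.List.pyRange 1 (rows * cols)).map some ++ [none]
  (PySem.List.pyRange 0 rows).map (fun i =>
    PySem.List.slice flat (some (i * cols)) (some ((i + 1) * cols)))

-- ===== PRECONDITION & SPEC =====
def Spec_generate_completed_env (rows : Int) (cols : Int) (out : List (List (Option Int))) : Prop := out = generate_completed_env_alt rows cols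
instance (rows : Int) (cols : Int) (out : List (List (Option Int))) : Decidable (Spec_generate_completed_env rows cols out) := by unfold Spec_generate_completed_env; infer_instance

-- ===== CLAIM (what is proved, stated in full; the proofs are below) =====
def Claim_equal_generate_completed_env : Prop := ∀ (rows : Int) (cols : Int), Dom_generate_completed_env rows cols → Spec_generate_completed_env rows cols (generate_completed_env rows cols)

-- ===== LEMMAS AND PROOFS =====

-- clampIdx facts specific to the slice bounds B uses
theorem pv_clampIdx_one_nonpos {z : Int} (hz : z ≤ 0) : PySem.List.clampIdx 1 z = 0 := by
  unfold PySem.List.clampIdx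
  split_ifs <;> omega

theorem pv_clampIdx_of_in_range (n : Nat) {a : Int} (h0 : 0 ≤ a) (h1 : a ≤ n) :
    PySem.List.clampIdx n a = a.toNat := by
  unfold PySem.List.clampIdx
  split_ifs <;> omega

-- the row produced for index i by A equals the slice B takes, for 0 ≤ i < rows
theorem pv_row_eq (rows cols i : Int) (hi0 : 0 ≤ i) (hir : i < rows) :
    (PySem.List.pyRange 0 cols).map
      (fun j => if i = rows - 1 ∧ j = cols - 1 then none else some (i * cols + j + 1))
    = PySem.List.slice ((PySem.List.pyRange 1 (rows * cols)).map some ++ [none])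
        (some (i * cols)) (some ((i + 1) * cols)) := by
  rcases le_or_gt cols 0 with hc | hc
  · -- empty rows: both sides are []
    have hL : PySem.List.pyRange 0 cols = [] := by
      rw [PySem.List.pyRange_of_pos 0 cols Int.one_pos, if_neg (by omega)]
      simp
    have hN : rows * cols ≤ 0 := mul_nonpos_of_nonneg_of_nonpos (by omega) hc
    have hR : PySem.List.pyRange 1 (rows * cols) = [] := by
      rw [PySem.List.pyRange_of_pos 1 (rows * cols) Int.one_pos, if_neg (by omega)]
      simp
    have hb : (i + 1) * cols ≤ 0 := mul_nonpos_of_nonneg_of_nonpos (by omega) hc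
    simp only [hL, hR, List.map_nil, List.nil_append, PySem.List.slice, List.length_singleton]
    rw [pv_clampIdx_one_nonpos hb]
    simp
  · -- cols > 0: the slice is the take/drop window and matches cell by cell
    have hr1 : (1:Int) ≤ rows := by omega
    have hN1 : (1:Int) ≤ rows * cols := by nlinarith
    have hrange : PySem.List.pyRange 1 (rows * cols)
        = (List.range (rows * cols - 1).toNat).map (fun (k : Nat) => 1 + 1 * (k : Int)) := by
      rw [PySem.List.pyRange_of_pos 1 (rows * cols) Int.one_pos]
      rcases eq_or_lt_of_le hN1 with h | h
      · have h0 : (rows * cols - 1).toNat = 0 := by omega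
        rw [if_neg (by omega), h0]
      · rw [if_pos (by omega)]
        congr 2
        omega
    have hflatlen : ((PySem.List.pyRange 1 (rows * cols)).map some ++ [none] :
        List (Option Int)).length = (rows * cols).toNat := by
      simp [hrange]; omega
    have hA : i * cols ≤ (rows - 1) * cols :=
      mul_le_mul_of_nonneg_right (by omega) (by omega)
    have hub : (i + 1) * cols ≤ rows * cols :=
      mul_le_mul_of_nonneg_right (by omega) (by omega)
    have hsum : i * cols + cols ≤ rows * cols := by nlinarith
    have hA0 : 0 ≤ i * cols := mul_nonneg hi0 (by omega)
    have hb0 : 0 ≤ (i + 1) * cols := mul_nonneg (by omega) (by omega)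
    have hpr0 : PySem.List.pyRange 0 cols
        = (List.range cols.toNat).map (fun (k : Nat) => (k : Int)) := by
      conv_lhs => rw [show cols = ((cols.toNat : Int)) from by omega]
      exact PySem.List.pyRange_zero_natCast _
    -- reduce the slice to take/drop with exact bounds
    simp only [PySem.List.slice, hflatlen]
    rw [pv_clampIdx_of_in_range _ hA0 (by omega),
        pv_clampIdx_of_in_range _ hb0 (by omega)]
    have hdiff : ((i + 1) * cols).toNat - (i * cols).toNat = cols.toNat := by
      have : (i + 1) * cols = i * cols + cols := by ring
      omega
    rw [hdiff, hpr0]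
    apply List.ext_getElem
    · simp [hrange]
      omega
    · intro j hj₁ hj₂
      simp only [List.length_map, List.length_range] at hj₁
      have hjc : (j : Int) < cols := by omega
      have hjlt : (i * cols).toNat + j < ((PySem.List.pyRange 1 (rows * cols)).map some ++ [none] :
          List (Option Int)).length := by rw [hflatlen]; omega
      simp only [List.getElem_map, List.getElem_range, List.getElem_take, List.getElem_drop]
      by_cases hlast : i = rows - 1 ∧ (j : Int) = cols - 1
      · -- the final cell: index rows*cols-1, the appended none
        have heq : i * cols + (j : Int) = rows * cols - 1 := by
          rw [hlast.1, hlast.2]; ring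
        have ht : (i * cols).toNat + j = (rows * cols - 1).toNat := by omega
        rw [if_pos hlast]
        rw [List.getElem_append_right (by simp [hrange]; omega)]
        simp [hrange, ht]
      · -- an interior cell: index < rows*cols-1, comes from the range part
        have ht : i * cols + (j : Int) < rows * cols - 1 := by
          rcases not_and_or.mp hlast with h | h
          · have hile : i ≤ rows - 2 := by omega
            have : i * cols ≤ (rows - 2) * cols :=
              mul_le_mul_of_nonneg_right hile (by omega)
            nlinarith
          · have hjle : (j : Int) ≤ cols - 2 := by omega
            nlinarith
        have htn : (i * cols).toNat + j < ((PySem.List.pyRange 1 (rows * cols)).map some).length := by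
          simp [hrange]; omega
        rw [if_neg hlast, List.getElem_append_left htn]
        simp only [hrange, List.getElem_map, List.getElem_range]
        congr 1
        push_cast
        omega

theorem generate_completed_env_eq (rows cols : Int) :
    generate_completed_env rows cols = generate_completed_env_alt rows cols := by
  unfold generate_completed_env generate_completed_env_alt
  rcases le_or_gt rows 0 with hr | hr
  · rw [if_pos hr, PySem.List.pyRange_of_pos 0 rows Int.one_pos, if_neg (by omega)]
    simp
  rw [if_neg (by omega)]
  rw [PySem.List.foldl_append_singleton_eq_map]
  simp only [List.nil_append]
  apply List.map_congr_left
  intro i hi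
  obtain ⟨hi0, hir⟩ := PySem.List.mem_pyRange_one.mp hi
  rw [PySem.List.foldl_append_singleton_eq_map]
  simpa using pv_row_eq rows cols i hi0 hir

-- ===== VERDICT (by name: the statement is the Claim_ definition above) =====
theorem generate_completed_env_spec : Claim_equal_generate_completed_env := by
  intro rows cols _
  exact generate_completed_env_eq rows cols
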